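-- pv_equiv track=rewrite | github.com/MahanyaKochhar/LeetCode-Profile | my-folder/4252-first-unique-even-element/solution.py | firstUniqueEven
-- ===== SOURCE A (Python) =====
-- def firstUniqueEven(nums: list[int]) -> int:
--     mp = {}
--     for num in nums:
--         if num % 2 == 0:
--             mp[num] = mp.get(num,0) + 1
--
--     for k,v in mp.items():
--         if v == 1:
--             return k
--     return -1
-- ===== SOURCE B (Python) =====
-- def firstUniqueEven(nums: list[int]) -> int:
--     seen = set()
--     dup = set()
--     for num in nums:
--         if num % 2 == 0:
--             if num in seen:
--                 dup.add(num)
--             else: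
--                 seen.add(num)
--     for num in nums:
--         if num % 2 == 0 and num not in dup:
--             return num
--     return -1
-- ===== Notes on version B (the rewrite author's own statement) =====
-- stated objective: idiomatic
-- what changed: Replaces the insertion-ordered count dict and its items() scan with duplicate-tracking sets (seen/dup) and a second scan over the original list in order.
import Mathlib
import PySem

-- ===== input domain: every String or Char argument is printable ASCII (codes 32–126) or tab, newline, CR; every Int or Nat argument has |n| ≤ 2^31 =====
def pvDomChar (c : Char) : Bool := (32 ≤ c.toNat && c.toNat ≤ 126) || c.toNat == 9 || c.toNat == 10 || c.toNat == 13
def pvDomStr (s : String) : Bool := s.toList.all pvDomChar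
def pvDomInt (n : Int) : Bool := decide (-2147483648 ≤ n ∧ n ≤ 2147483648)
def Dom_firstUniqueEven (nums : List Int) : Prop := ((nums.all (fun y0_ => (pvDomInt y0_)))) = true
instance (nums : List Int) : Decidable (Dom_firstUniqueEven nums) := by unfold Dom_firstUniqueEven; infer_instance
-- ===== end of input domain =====

-- B replaces A's insertion-ordered count dict + items() scan with duplicate-tracking
-- sets and a second scan of the original list (idiomatic; same asymptotic cost).


-- ===== PORT A =====
-- the 'mp = {}; for num in nums: …' counting loop of A
def firstUniqueEvenMp (nums : List Int) : PySem.Dict Int Int :=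
  nums.foldl
    (fun mp num =>
      if PySem.Int.mod num 2 == 0 then mp.insert num (mp.getD num 0 + 1) else mp)
    PySem.Dict.empty

def firstUniqueEven (nums : List Int) : Int :=
  match (firstUniqueEvenMp nums).items.find? (fun kv => kv.2 == 1) with
  | some kv => kv.1
  | none => -1

-- ===== PORT B =====
-- the 'seen = set(); dup = set(); for num in nums: …' loop of B (state = (seen, dup))
def firstUniqueEvenSd (nums : List Int) : PySem.Set Int × PySem.Set Int :=
  nums.foldl
    (fun (sd : PySem.Set Int × PySem.Set Int) num =>
      if PySem.Int.mod num 2 == 0 then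
        if sd.1.contains num then (sd.1, sd.2.add num) else (sd.1.add num, sd.2)
      else sd)
    (PySem.Set.empty, PySem.Set.empty)

def firstUniqueEven_alt (nums : List Int) : Int :=
  match nums.find? (fun num =>
      PySem.Int.mod num 2 == 0 && !(firstUniqueEvenSd nums).2.contains num) with
  | some num => num
  | none => -1

-- ===== PRECONDITION & SPEC =====
def Spec_firstUniqueEven (nums : List Int) (out : Int) : Prop := out = firstUniqueEven_alt nums
instance (nums : List Int) (out : Int) : Decidable (Spec_firstUniqueEven nums out) := by unfold Spec_firstUniqueEven; infer_instance

-- ===== CLAIM (what is proved, stated in full; the proofs are below) =====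
def Claim_equal_firstUniqueEven : Prop := ∀ (nums : List Int), Dom_firstUniqueEven nums → Spec_firstUniqueEven nums (firstUniqueEven nums)

-- ===== LEMMAS AND PROOFS =====

-- find? is determined by the predicate's values on the list's members
theorem find?_congr_mem {α : Type} (l : List α) (f g : α → Bool)
    (h : ∀ x ∈ l, f x = g x) : l.find? f = l.find? g := by
  induction l with
  | nil => rfl
  | cons x t ih =>
    have hx := h x (by simp)
    simp only [List.find?_cons, hx]
    cases g x with
    | true => rfl
    | false => exact ih (fun y hy => h y (by simp [hy]))

-- the accumulator stays a prefix through a Set.add fold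
theorem prefix_foldl_add (l s : List Int) : s <+: List.foldl PySem.Set.add s l := by
  induction l generalizing s with
  | nil => exact List.prefix_refl s
  | cons x t ih =>
    refine List.IsPrefix.trans ?_ (ih (PySem.Set.add s x))
    by_cases hx : x ∈ s
    · simp [PySem.Set.add, hx]
    · have : PySem.Set.add s x = s ++ [x] := by simp [PySem.Set.add, hx]
      rw [this]
      exact List.prefix_append s [x]

-- first-occurrence dedup (Set.ofList via foldl add) preserves find?
theorem find?_foldl_add (p : Int → Bool) (l : List Int) :
    ∀ s : List Int, (∀ y ∈ s, p y = false) →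
      (List.foldl PySem.Set.add s l).find? p = l.find? p := by
  induction l with
  | nil =>
    intro s hs
    simp only [List.foldl_nil, List.find?_nil]
    rw [List.find?_eq_none]
    intro y hy
    simp [hs y hy]
  | cons x t ih =>
    intro s hs
    simp only [List.foldl_cons, List.find?_cons]
    cases hpx : p x with
    | false =>
      by_cases hx : x ∈ s
      · have : PySem.Set.add s x = s := by simp [PySem.Set.add, hx]
        rw [this]; exact ih s hs
      · have : PySem.Set.add s x = s ++ [x] := by simp [PySem.Set.add, hx]
        rw [this]
        refine ih (s ++ [x]) ?_
        intro y hy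
        rcases List.mem_append.mp hy with h | h
        · exact hs y h
        · simp only [List.mem_singleton] at h; subst h; exact hpx
    | true =>
      have hxs : x ∉ s := fun hmem => by simp [hs x hmem] at hpx
      have hadd : PySem.Set.add s x = s ++ [x] := by simp [PySem.Set.add, hxs]
      rw [hadd]
      obtain ⟨rest, hrest⟩ := prefix_foldl_add t (s ++ [x])
      rw [← hrest, List.append_assoc, List.find?_append,
        List.find?_eq_none.mpr (fun y hy => by simp [hs y hy])]
      simp [hpx]

-- membership in B's dup set after the fold: a duplicate among what was processed
theorem dup_foldl_mem (l : List Int) :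
    ∀ (s d : PySem.Set Int) (x : Int),
      (x ∈ (l.foldl (fun (sd : PySem.Set Int × PySem.Set Int) y =>
          if sd.1.contains y then (sd.1, sd.2.add y) else (sd.1.add y, sd.2)) (s, d)).2)
        ↔ x ∈ d ∨ (x ∈ l ∧ (x ∈ s ∨ 2 ≤ l.count x)) := by
  induction l with
  | nil => intro s d x; simp
  | cons y t ih =>
    intro s d x
    simp only [List.foldl_cons]
    have hpos := List.count_pos_iff (a := x) (l := t)
    by_cases hys : y ∈ s
    · rw [if_pos (show PySem.Set.contains s y = true by simp [PySem.Set.contains, hys])]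
      rw [ih s (PySem.Set.add d y) x, PySem.Set.mem_add]
      by_cases hxd : x ∈ d <;> by_cases hxy : x = y <;> by_cases hxt : x ∈ t <;>
        (simp_all [List.count_cons];
         try omega;
         try (rw [if_neg (fun hh => hxy hh.symm)]; simp))
    · rw [if_neg (show ¬ PySem.Set.contains s y = true by simp [PySem.Set.contains, hys])]
      rw [ih (PySem.Set.add s y) d x, PySem.Set.mem_add]
      by_cases hxd : x ∈ d <;> by_cases hxy : x = y <;> by_cases hxt : x ∈ t <;>
        (simp_all [List.count_cons];
         try omega;
         try (rw [if_neg (fun hh => hxy hh.symm)]; simp))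

-- A's counting loop over nums is the Counter of the evens of nums
theorem evens_foldl_A (nums : List Int) :
    firstUniqueEvenMp nums
      = PySem.Dict.counter (nums.filter (fun x => PySem.Int.mod x 2 == 0)) := by
  unfold firstUniqueEvenMp
  rw [← PySem.Dict.foldl_insert_getD_add_one_eq_counter, List.foldl_filter]

-- B's seen/dup loop over nums is the unguarded loop over the evens of nums
theorem evens_foldl_B (nums : List Int) :
    firstUniqueEvenSd nums
      = (nums.filter (fun x => PySem.Int.mod x 2 == 0)).foldl
          (fun (sd : PySem.Set Int × PySem.Set Int) num =>
            if sd.1.contains num then (sd.1, sd.2.add num) else (sd.1.add num, sd.2))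
          (PySem.Set.empty, PySem.Set.empty) := by
  unfold firstUniqueEvenSd
  rw [List.foldl_filter]

-- ===== VERDICT (by name: the statement is the Claim_ definition above) =====
theorem firstUniqueEven_spec : Claim_equal_firstUniqueEven := by
  intro nums _
  unfold Spec_firstUniqueEven firstUniqueEven firstUniqueEven_alt
  rw [evens_foldl_A]
  set evens := nums.filter (fun x => PySem.Int.mod x 2 == 0) with hev
  have hdupmem : ∀ x, x ∈ (firstUniqueEvenSd nums).2 ↔ 2 ≤ evens.count x := by
    intro x
    rw [evens_foldl_B, ← hev, dup_foldl_mem]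
    constructor
    · rintro (h | ⟨h1, h2 | h2⟩) <;> simp_all [PySem.Set.empty]
    · intro h
      have hx : x ∈ evens := List.count_pos_iff.mp (by omega)
      exact Or.inr ⟨hx, Or.inr h⟩
  rw [PySem.Dict.items_counter, List.find?_map]
  have hAc : List.find? ((fun kv : Int × Int => kv.2 == 1) ∘ fun k => (k, (evens.count k : Int)))
      (PySem.Set.ofList evens)
      = List.find? (fun k => ((evens.count k : Int) == 1)) (PySem.Set.ofList evens) :=
    find?_congr_mem _ _ _ (fun x _ => by simp [Function.comp])
  rw [hAc]
  have hBfind : nums.find? (fun num =>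
        PySem.Int.mod num 2 == 0 && !(firstUniqueEvenSd nums).2.contains num)
      = evens.find? (fun num => !(firstUniqueEvenSd nums).2.contains num) := by
    rw [hev, List.find?_filter]
    exact find?_congr_mem _ _ _ (fun x _ => by cases PySem.Int.mod x 2 == 0 <;> simp)
  rw [hBfind]
  have hpred : evens.find? (fun num => !(firstUniqueEvenSd nums).2.contains num)
      = evens.find? (fun k => ((evens.count k : Int) == 1)) := by
    refine find?_congr_mem evens _ _ ?_
    intro x hx
    have hc1 : 1 ≤ evens.count x := List.count_pos_iff.mpr hx
    by_cases h2 : 2 ≤ evens.count x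
    · have hmem := (hdupmem x).mpr h2
      have hne : ¬ ((evens.count x : Int) = 1) := by omega
      simp [hmem, hne]
    · have hc : evens.count x = 1 := by omega
      have hnm : x ∉ (firstUniqueEvenSd nums).2 := fun hm => h2 ((hdupmem x).mp hm)
      simp [hnm, hc]
  rw [hpred]
  have hA : (PySem.Set.ofList evens).find? (fun k => ((evens.count k : Int) == 1))
      = evens.find? (fun k => ((evens.count k : Int) == 1)) :=
    find?_foldl_add _ evens [] (by simp)
  rw [hA]
  cases evens.find? (fun k => ((evens.count k : Int) == 1)) <;> simp
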